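-- pv_equiv track=rewrite | github.com/lnidogon/carcassonne-classification | code/classify/measurePerformance.py | class_to_description
-- ===== SOURCE A (Python) =====
-- def class_to_description(c):
--     ans = []
--     for i in range(4):
--         if c%3 == 0:
--             ans.append('G')
--         if c%3 == 1:
--             ans.append('R')
--         if c%3 == 2:
--             ans.append('T')
--         c //= 3
--     return ans[::-1]
-- ===== SOURCE B (Python) =====
-- def class_to_description(c):
--     # Compute each base-3 digit directly from the original c, most-significant first:
--     # no running quotient, no appends, no final reversal.
--     def letter(d):
--         return 'G' if d == 0 else ('R' if d == 1 else 'T')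
--     return [letter((c // 3 ** (3 - i)) % 3) for i in range(4)]
-- ===== Notes on version B (the rewrite author's own statement) =====
-- stated objective: simpler
-- what changed: Each of the 4 base-3 digits is computed directly from the original c as (c // 3**(3-i)) % 3 and emitted most-significant-first, replacing the running-quotient loop with conditional appends and the final list reversal.
import Mathlib
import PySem

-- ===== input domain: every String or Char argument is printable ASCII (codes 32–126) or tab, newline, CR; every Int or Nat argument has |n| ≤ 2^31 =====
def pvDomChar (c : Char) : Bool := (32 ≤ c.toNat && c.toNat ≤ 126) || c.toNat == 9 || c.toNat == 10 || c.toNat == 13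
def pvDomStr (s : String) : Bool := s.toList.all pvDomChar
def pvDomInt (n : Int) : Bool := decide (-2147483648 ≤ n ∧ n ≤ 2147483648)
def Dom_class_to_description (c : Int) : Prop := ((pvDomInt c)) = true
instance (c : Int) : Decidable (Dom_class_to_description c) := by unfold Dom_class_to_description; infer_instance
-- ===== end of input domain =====

-- B computes each base-3 digit directly from the original c (most-significant first),
-- replacing A's running-quotient loop with conditional appends and final reversal; objective: simpler.


-- ===== PORT A =====
def class_to_description (c : Int) : List String :=
  let st := (PySem.List.pyRange 0 4 1).foldl (fun (st : List String × Int) _ =>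
    let ans := st.1
    let c := st.2
    let ans := if PySem.Int.mod c 3 = 0 then ans ++ ["G"] else ans
    let ans := if PySem.Int.mod c 3 = 1 then ans ++ ["R"] else ans
    let ans := if PySem.Int.mod c 3 = 2 then ans ++ ["T"] else ans
    (ans, PySem.Int.floordiv c 3)) ([], c)
  (PySem.List.slice? st.1 none none (-1)).getD []

-- ===== PORT B =====
def pvLetter (d : Int) : String := if d = 0 then "G" else if d = 1 then "R" else "T"

def class_to_description_alt (c : Int) : List String :=
  (PySem.List.pyRange 0 4 1).map (fun i =>
    pvLetter (PySem.Int.mod (PySem.Int.floordiv c ((3 : Int) ^ ((3 : Int) - i).toNat)) 3))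

-- ===== PRECONDITION & SPEC =====
def Spec_class_to_description (c : Int) (out : List String) : Prop := out = class_to_description_alt c
instance (c : Int) (out : List String) : Decidable (Spec_class_to_description c out) := by unfold Spec_class_to_description; infer_instance

-- ===== CLAIM (what is proved, stated in full; the proofs are below) =====
def Claim_equal_class_to_description : Prop := ∀ (c : Int), Dom_class_to_description c → Spec_class_to_description c (class_to_description c)

-- ===== LEMMAS AND PROOFS =====

-- one loop body of A appends exactly the letter of c % 3
theorem pv_step (ans : List String) (c : Int) :
    (let a1 := if PySem.Int.mod c 3 = 0 then ans ++ ["G"] else ans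
     let a2 := if PySem.Int.mod c 3 = 1 then a1 ++ ["R"] else a1
     if PySem.Int.mod c 3 = 2 then a2 ++ ["T"] else a2) = ans ++ [pvLetter (PySem.Int.mod c 3)] := by
  have hm : PySem.Int.mod c 3 = c % 3 := PySem.Int.mod_eq_emod_of_pos (by omega)
  have h0 : 0 ≤ c % 3 := Int.emod_nonneg c (by omega)
  have h3 : c % 3 < 3 := Int.emod_lt_of_pos c (by omega)
  have hc : c % 3 = 0 ∨ c % 3 = 1 ∨ c % 3 = 2 := by omega
  rcases hc with h | h | h <;> simp only [hm, h] <;> norm_num [pvLetter]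

theorem pv_fdiv_fdiv (c a b : Int) (ha : 0 < a) (hb : 0 < b) :
    PySem.Int.floordiv (PySem.Int.floordiv c a) b = PySem.Int.floordiv c (a * b) := by
  rw [PySem.Int.floordiv_eq_ediv_of_pos ha, PySem.Int.floordiv_eq_ediv_of_pos hb,
      PySem.Int.floordiv_eq_ediv_of_pos (by positivity), Int.ediv_ediv_of_nonneg (le_of_lt ha)]

theorem pv_fdiv_one (c : Int) : PySem.Int.floordiv c 1 = c := by
  rw [PySem.Int.floordiv_eq_ediv_of_pos (by omega : (0:Int) < 1)]; exact Int.ediv_one c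

-- ===== VERDICT (by name: the statement is the Claim_ definition above) =====
theorem class_to_description_spec : Claim_equal_class_to_description := by
  intro c _
  unfold Spec_class_to_description class_to_description class_to_description_alt
  have hr : PySem.List.pyRange 0 4 1 = [0, 1, 2, 3] := by decide
  rw [hr]
  simp only [List.foldl, List.map, pv_step]
  rw [PySem.List.slice?_none_none_neg_one]
  simp only [Option.getD_some, List.nil_append, List.append_assoc, List.singleton_append]
  rw [pv_fdiv_fdiv c 3 3 (by omega) (by omega),
      pv_fdiv_fdiv c (3*3) 3 (by omega) (by omega)]
  have ht : Int.toNat 3 = 3 := by decide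
  have ht2 : Int.toNat 2 = 2 := by decide
  norm_num [pv_fdiv_one, ht, ht2]
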